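-- pv_equiv track=rewrite | github.com/codeislife99/Daily_Coding_Problems_Solutions | 312.py | solve_iter
-- ===== SOURCE A (Python) =====
-- def solve_iter(n):
-- 	f = [0 for _ in range(n+1)]
-- 	g = [0 for _ in range(n+1)]
--
-- 	f[1] = 1;f[2] = 2;
-- 	g[1] = 1;g[2] = 2;
--
-- 	for i in range(3,n+1):
-- 		f[i] = f[i-1] + f[i-2] + 2*g[i-2]
-- 		g[i] = g[i-1] + f[i-1]
--
--
-- 	return f[n]
-- ===== SOURCE B (Python) =====
-- def solve_iter(n):
--     # decoupled recurrence: f[n] = 2*f[n-1] + f[n-3] (f1,f2,f3 = 1,2,5); no g, no arrays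
--     if n <= 2:
--         return n
--     a, b, c = 1, 2, 5
--     for _ in range(n - 3):
--         a, b, c = b, c, 2 * c + a
--     return c
-- ===== Notes on version B (the rewrite author's own statement) =====
-- stated objective: faster
-- what changed: Replaces the two O(n)-size arrays and the coupled f/g recurrence (4 bignum additions per step) by a single rolling-window loop over the decoupled 3-term recurrence f[n] = 2*f[n-1] + f[n-3], using O(1) space and one update per step.
import Mathlib
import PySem

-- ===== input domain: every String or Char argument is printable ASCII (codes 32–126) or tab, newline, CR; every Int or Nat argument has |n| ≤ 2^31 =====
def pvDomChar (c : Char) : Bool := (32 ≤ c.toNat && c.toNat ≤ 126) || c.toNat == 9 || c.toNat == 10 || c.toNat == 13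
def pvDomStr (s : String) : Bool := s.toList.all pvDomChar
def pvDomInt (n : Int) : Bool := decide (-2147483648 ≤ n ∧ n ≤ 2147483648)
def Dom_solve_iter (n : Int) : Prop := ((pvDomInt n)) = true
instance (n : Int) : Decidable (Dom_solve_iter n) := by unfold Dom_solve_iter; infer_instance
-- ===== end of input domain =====

-- B replaces A's two arrays and coupled f/g recurrence by a 3-variable rolling loop over the
-- decoupled recurrence f[n] = 2*f[n-1] + f[n-3] (objective: faster by a constant factor).

-- ===== PORT A =====
-- one loop iteration: f[i] = f[i-1] + f[i-2] + 2*g[i-2]; g[i] = g[i-1] + f[i-1]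
-- (indices are always ≥ 1; pySetD/pyGetD are exact for in-range indices, which Pre_ guarantees)
def solve_iter_step (st : List Int × List Int) (i : Int) : List Int × List Int :=
  let f := PySem.List.pySetD st.1 i
      (PySem.List.pyGetD st.1 (i-1) 0 + PySem.List.pyGetD st.1 (i-2) 0 +
       2 * PySem.List.pyGetD st.2 (i-2) 0)
  let g := PySem.List.pySetD st.2 i
      (PySem.List.pyGetD st.2 (i-1) 0 + PySem.List.pyGetD f (i-1) 0)
  (f, g)

def solve_iter (n : Int) : Int :=
  let f : List Int := (PySem.List.pyRange 0 (n+1) 1).map (fun _ => 0)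
  let g : List Int := (PySem.List.pyRange 0 (n+1) 1).map (fun _ => 0)
  let f := PySem.List.pySetD (PySem.List.pySetD f 1 1) 2 2
  let g := PySem.List.pySetD (PySem.List.pySetD g 1 1) 2 2
  let st := (PySem.List.pyRange 3 (n+1) 1).foldl solve_iter_step (f, g)
  PySem.List.pyGetD st.1 n 0

-- ===== PORT B =====
def solve_iter_alt (n : Int) : Int :=
  if n ≤ 2 then n
  else
    let t := (PySem.List.pyRange 0 (n-3) 1).foldl
      (fun (t : Int × Int × Int) _ => (t.2.1, t.2.2, 2 * t.2.2 + t.1)) (1, 2, 5)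
    t.2.2

-- ===== PRECONDITION & SPEC =====
-- Pre_: A raises IndexError for n ≤ 1 (the arrays are too short for the f[1]=1 / f[2]=2 assignments)
def Pre_solve_iter (n : Int) : Prop := 2 ≤ n
instance (n : Int) : Decidable (Pre_solve_iter n) := by unfold Pre_solve_iter; infer_instance
def pvWitness_solve_iter : Int := (5)

def Spec_solve_iter (n : Int) (out : Int) : Prop := out = solve_iter_alt n
instance (n : Int) (out : Int) : Decidable (Spec_solve_iter n out) := by unfold Spec_solve_iter; infer_instance

-- ===== CLAIM (what is proved, stated in full; the proofs are below) =====
def Claim_equal_solve_iter : Prop := ∀ (n : Int), Dom_solve_iter n → Pre_solve_iter n → Spec_solve_iter n (solve_iter n)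

-- ===== LEMMAS AND PROOFS =====

-- Reference state pvS k = (f[k+2], f[k+1], g[k+2], g[k+1]) of A's coupled recurrence.
def pvS : Nat → Int × Int × Int × Int
  | 0 => (2, 1, 2, 1)
  | k + 1 =>
    let s := pvS k
    (s.1 + s.2.1 + 2 * s.2.2.2, s.1, s.2.2.1 + s.1, s.2.2.1)

-- g[k+2] = f[k+1] + g[k+1] also at the base (the link that decouples f)
theorem pvS_g (k : Nat) : (pvS k).2.2.1 = (pvS k).2.1 + (pvS k).2.2.2 := by
  induction k with
  | zero => decide
  | succ k ih => simp [pvS]; ring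

-- B's rolling triple after k iterations
def pvT (k : Nat) : Int × Int × Int :=
  (List.range k).foldl (fun (t : Int × Int × Int) _ => (t.2.1, t.2.2, 2 * t.2.2 + t.1)) (1, 2, 5)

theorem pvT_eq (k : Nat) : pvT k = ((pvS k).2.1, (pvS k).1, (pvS (k+1)).1) := by
  induction k with
  | zero => decide
  | succ k ih =>
    have hg := pvS_g k
    unfold pvT at *
    rw [List.range_succ, List.foldl_append, ih]
    simp only [List.foldl_cons, List.foldl_nil]
    simp [pvS]
    omega

theorem solve_iter_alt_eq (n : Int) (h : 2 ≤ n) :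
    solve_iter_alt n = (pvS (n - 2).toNat).1 := by
  unfold solve_iter_alt
  by_cases h2 : n ≤ 2
  · have hn2 : n = 2 := le_antisymm h2 h
    subst hn2; decide
  · simp only [if_neg h2]
    rw [PySem.List.pyRange_one 0 (n-3), List.foldl_map]
    have ht : (List.range (n-3+0*0).toNat).foldl
        (fun (t : Int × Int × Int) _ => (t.2.1, t.2.2, 2 * t.2.2 + t.1)) (1, 2, 5)
        = pvT (n-3).toNat := by simp [pvT]
    have hk : (n-3-0).toNat = (n-3).toNat := by omega
    rw [hk]
    show (pvT (n-3).toNat).2.2 = _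
    rw [pvT_eq]
    have : (n-3).toNat + 1 = (n-2).toNat := by omega
    rw [this]

-- getD/set helper facts
theorem pv_getD_set_self (xs : List Int) (n : Nat) (v d : Int) (h : n < xs.length) :
    (xs.set n v).getD n d = v := by
  simp [List.getD, h]

theorem pv_getD_set_ne (xs : List Int) (n m : Nat) (v d : Int) (h : m ≠ n) :
    (xs.set n v).getD m d = xs.getD m d := by
  simp [List.getD, Ne.symm h]

-- the loop invariant: lengths fixed, and the four most recent entries equal pvS k
def pvInv (n : Int) (k : Nat) (st : List Int × List Int) : Prop :=
  st.1.length = (n+1).toNat ∧ st.2.length = (n+1).toNat ∧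
  st.1.getD (k+2) 0 = (pvS k).1 ∧
  st.1.getD (k+1) 0 = (pvS k).2.1 ∧
  st.2.getD (k+2) 0 = (pvS k).2.2.1 ∧
  st.2.getD (k+1) 0 = (pvS k).2.2.2

theorem pvInv_step (n : Int) (k : Nat) (st : List Int × List Int)
    (hk : (k:Int) + 3 ≤ n) (h : pvInv n k st) :
    pvInv n (k+1) (solve_iter_step st ((k:Int)+3)) := by
  obtain ⟨hl1, hl2, ha, hb, hc, hd⟩ := h
  have c3 : ((k:Int)+3) = ((k+3 : Nat) : Int) := by push_cast; ring
  have c2 : (((k+3 : Nat) : Int)-1) = ((k+2 : Nat) : Int) := by push_cast; ring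
  have c1 : (((k+3 : Nat) : Int)-2) = ((k+1 : Nat) : Int) := by push_cast; ring
  have hlt : k+3 < st.1.length := by omega
  have hlt2 : k+3 < st.2.length := by omega
  unfold solve_iter_step pvInv
  simp only [c3, c2, c1, PySem.List.pySetD_natCast, PySem.List.pyGetD_natCast]
  refine ⟨by simpa using hl1, by simpa using hl2, ?_, ?_, ?_, ?_⟩
  · -- f[k+3]
    show (st.1.set (k+3) _).getD (k+1+2) 0 = _
    rw [show k+1+2 = k+3 from rfl, pv_getD_set_self _ _ _ _ hlt, ha, hb, hd]
    simp [pvS]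
  · show (st.1.set (k+3) _).getD (k+1+1) 0 = _
    rw [show k+1+1 = k+2 from rfl, pv_getD_set_ne _ _ _ _ _ (by omega), ha]
    simp [pvS]
  · show (st.2.set (k+3) _).getD (k+1+2) 0 = _
    rw [show k+1+2 = k+3 from rfl, pv_getD_set_self _ _ _ _ hlt2,
        pv_getD_set_ne _ _ _ _ _ (by omega), ha, hc]
    simp [pvS]
  · show (st.2.set (k+3) _).getD (k+1+1) 0 = _
    rw [show k+1+1 = k+2 from rfl, pv_getD_set_ne _ _ _ _ _ (by omega), hc]
    simp [pvS]

-- the initial state of A's loop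
def pvInit (n : Int) : List Int × List Int :=
  (PySem.List.pySetD (PySem.List.pySetD ((PySem.List.pyRange 0 (n+1) 1).map (fun _ => 0)) 1 1) 2 2,
   PySem.List.pySetD (PySem.List.pySetD ((PySem.List.pyRange 0 (n+1) 1).map (fun _ => 0)) 1 1) 2 2)

theorem pvInit_inv (n : Int) (hn : 2 ≤ n) : pvInv n 0 (pvInit n) := by
  have hlen : ((PySem.List.pyRange 0 (n+1) 1).map (fun _ => (0:Int))).length = (n+1).toNat := by
    simp [PySem.List.length_pyRange_one]
  have h1 : (1:Int) = ((1:Nat):Int) := by norm_num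
  have h2 : (2:Int) = ((2:Nat):Int) := by norm_num
  unfold pvInit pvInv
  simp only [h1, h2, PySem.List.pySetD_natCast]
  refine ⟨by simp, by simp, ?_, ?_, ?_, ?_⟩
  · rw [pv_getD_set_self _ _ _ _ (by simp; omega)]; rfl
  · rw [pv_getD_set_ne _ _ _ _ _ (by omega), pv_getD_set_self _ _ _ _ (by simp; omega)]; rfl
  · rw [pv_getD_set_self _ _ _ _ (by simp; omega)]; rfl
  · rw [pv_getD_set_ne _ _ _ _ _ (by omega), pv_getD_set_self _ _ _ _ (by simp; omega)]; rfl

theorem pvA_fold (n : Int) (hn : 2 ≤ n) (k : Nat) (hk : (k:Int) + 2 ≤ n) :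
    pvInv n k ((PySem.List.pyRange 3 (3+(k:Int)) 1).foldl solve_iter_step (pvInit n)) := by
  induction k with
  | zero =>
    rw [PySem.List.pyRange_one_eq_nil (by omega)]
    exact pvInit_inv n hn
  | succ k ih =>
    have hk' : (k:Int) + 2 ≤ n := by push_cast at hk ⊢; omega
    have hsplit : PySem.List.pyRange 3 (3+((k+1:Nat):Int)) 1
        = PySem.List.pyRange 3 (3+(k:Int)) 1 ++ [3+(k:Int)] := by
      have : (3+((k+1:Nat):Int)) = (3+(k:Int)) + 1 := by push_cast; ring
      rw [this, PySem.List.pyRange_one_succ_right (by omega)]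
    rw [hsplit, List.foldl_append, List.foldl_cons, List.foldl_nil]
    have := pvInv_step n k _ (by push_cast at hk ⊢; omega) (ih hk')
    rwa [show ((k:Int)+3) = 3+(k:Int) by ring] at this

theorem solve_iter_unfold (n : Int) :
    solve_iter n = PySem.List.pyGetD
      ((PySem.List.pyRange 3 (n+1) 1).foldl solve_iter_step (pvInit n)).1 n 0 := rfl

theorem solve_iter_eq (n : Int) (h : 2 ≤ n) :
    solve_iter n = (pvS (n - 2).toNat).1 := by
  have hrange : PySem.List.pyRange 3 (n+1) 1 = PySem.List.pyRange 3 (3+(((n-2).toNat):Int)) 1 := by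
    congr 1; omega
  have hinv := pvA_fold n h (n-2).toNat (by omega)
  obtain ⟨-, -, ha, -, -, -⟩ := hinv
  rw [solve_iter_unfold n, hrange]
  generalize hg : ((PySem.List.pyRange 3 (3+(((n-2).toNat):Int)) 1).foldl solve_iter_step (pvInit n)) = st at ha ⊢
  conv_lhs => rw [show n = (((n-2).toNat+2:Nat):Int) from by omega]
  rw [PySem.List.pyGetD_natCast]
  exact ha

-- ===== VERDICT (by name: the statement is the Claim_ definition above) =====
theorem solve_iter_spec : Claim_equal_solve_iter := by
  intro n _ hpre
  unfold Spec_solve_iter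
  rw [solve_iter_eq n hpre, solve_iter_alt_eq n hpre]
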